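-- pv_equiv track=rewrite | github.com/jialuli-luka/Debate_Persuation_Argument_Structure | src/language_features.py | get_modals
-- ===== SOURCE A (Python) =====
-- def get_modals(text):
--
--     could_count = 0
--     can_count = 0
--     would_count = 0
--     shall_count = 0
--     should_count = 0
--     will_count = 0
--     must_count = 0
--     may_count = 0
--     might_count = 0
--
--     for word in text:
--         if word.lower()=="could":
--              could_count += 1
--         if word.lower()=="can":
--              can_count += 1
--         if word.lower()=="would":
--              would_count += 1
--         if word.lower()=="shall":
--              shall_count += 1
--         if word.lower()=="should":
--              should_count += 1
--         if word.lower()=="will":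
--              will_count += 1
--         if word.lower()=="must":
--              must_count += 1
--
--         if word.lower()=="may":
--              may_count += 1
--         if word.lower()=="might":
--              might_count += 1
--
--     return [could_count, can_count, would_count, shall_count, should_count, will_count, must_count, may_count,
--             might_count]
-- ===== SOURCE B (Python) =====
-- def get_modals(text):
--     words = [w.lower() for w in text]
--     return [words.count(m) for m in
--             ('could', 'can', 'would', 'shall', 'should', 'will', 'must', 'may', 'might')]
-- ===== Notes on version B (the rewrite author's own statement) =====
-- stated objective: simpler
-- what changed: Replaces A's single pass carrying nine named counters and nine per-word equality branches with staged passes: lowercase the list once, then answer each modal by an independent list.count scan of the lowered list.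
import Mathlib
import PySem

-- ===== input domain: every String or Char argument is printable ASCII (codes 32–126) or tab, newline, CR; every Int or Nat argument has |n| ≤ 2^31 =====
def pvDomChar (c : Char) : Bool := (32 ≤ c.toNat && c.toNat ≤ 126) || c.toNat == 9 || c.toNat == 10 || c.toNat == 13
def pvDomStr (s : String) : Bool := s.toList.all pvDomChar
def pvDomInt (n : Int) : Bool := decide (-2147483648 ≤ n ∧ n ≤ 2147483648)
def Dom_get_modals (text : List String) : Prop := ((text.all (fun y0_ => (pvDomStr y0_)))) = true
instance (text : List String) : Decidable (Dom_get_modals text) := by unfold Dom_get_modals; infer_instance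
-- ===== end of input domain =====

-- B stages the work: lowercase the whole list once, then one independent
-- list.count scan per modal, instead of A's single pass with nine named counters (objective: simpler).

-- ===== PORT A =====
-- the loop over `text`, carrying the nine counters of A in order
def getModalsLoop : List String → Int → Int → Int → Int → Int → Int → Int → Int → Int → List Int
  | [], could_c, can_c, would_c, shall_c, should_c, will_c, must_c, may_c, might_c =>
      [could_c, can_c, would_c, shall_c, should_c, will_c, must_c, may_c, might_c]
  | word :: rest, could_c, can_c, would_c, shall_c, should_c, will_c, must_c, may_c, might_c =>
      getModalsLoop rest
        (if PySem.Str.lower word = "could" then could_c + 1 else could_c)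
        (if PySem.Str.lower word = "can" then can_c + 1 else can_c)
        (if PySem.Str.lower word = "would" then would_c + 1 else would_c)
        (if PySem.Str.lower word = "shall" then shall_c + 1 else shall_c)
        (if PySem.Str.lower word = "should" then should_c + 1 else should_c)
        (if PySem.Str.lower word = "will" then will_c + 1 else will_c)
        (if PySem.Str.lower word = "must" then must_c + 1 else must_c)
        (if PySem.Str.lower word = "may" then may_c + 1 else may_c)
        (if PySem.Str.lower word = "might" then might_c + 1 else might_c)

def get_modals (text : List String) : List Int :=
  getModalsLoop text 0 0 0 0 0 0 0 0 0

-- ===== PORT B =====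
def get_modals_alt (text : List String) : List Int :=
  let words := text.map PySem.Str.lower
  ["could", "can", "would", "shall", "should", "will", "must", "may", "might"].map
    (fun m => ((PySem.List.count words m : Nat) : Int))

-- ===== PRECONDITION & SPEC =====
def Spec_get_modals (text : List String) (out : List Int) : Prop := out = get_modals_alt text
instance (text : List String) (out : List Int) : Decidable (Spec_get_modals text out) := by unfold Spec_get_modals; infer_instance

-- ===== CLAIM (what is proved, stated in full; the proofs are below) =====
def Claim_equal_get_modals : Prop := ∀ (text : List String), Dom_get_modals text → Spec_get_modals text (get_modals text)

-- ===== LEMMAS AND PROOFS =====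
theorem cntStep (w : String) (rest : List String) (m : String) (a : Int) :
    (if PySem.Str.lower w = m then a + 1 else a) + (((rest.map PySem.Str.lower).count m : Nat) : Int)
      = a + ((((w :: rest).map PySem.Str.lower).count m : Nat) : Int) := by
  by_cases h : PySem.Str.lower w = m <;>
    simp [List.count_cons, h, eq_comm] <;> push_cast <;> ring

theorem getModalsLoop_eq (text : List String)
    (a b c d e f g h i : Int) :
    getModalsLoop text a b c d e f g h i =
      let L := text.map PySem.Str.lower
      [a + L.count "could", b + L.count "can", c + L.count "would",
       d + L.count "shall", e + L.count "should", f + L.count "will",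
       g + L.count "must", h + L.count "may", i + L.count "might"] := by
  induction text generalizing a b c d e f g h i with
  | nil => simp [getModalsLoop]
  | cons w rest ih =>
      simp only [getModalsLoop, ih, List.cons.injEq, and_true]
      exact ⟨cntStep _ _ _ _, cntStep _ _ _ _, cntStep _ _ _ _, cntStep _ _ _ _,
        cntStep _ _ _ _, cntStep _ _ _ _, cntStep _ _ _ _, cntStep _ _ _ _, cntStep _ _ _ _⟩

-- ===== VERDICT (by name: the statement is the Claim_ definition above) =====
theorem get_modals_spec : Claim_equal_get_modals := by
  intro text _
  unfold Spec_get_modals get_modals get_modals_alt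
  rw [getModalsLoop_eq]
  simp [PySem.List.count]
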